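-- pv_equiv track=rewrite | github.com/rawlink/advent-of-code-2021 | day1/day1.py | part2
-- ===== SOURCE A (Python) =====
-- from collections import deque
--
-- def part2(depths):
--     '''
--     >>> part2(load('input.txt'))
--     1653
--     '''
--     windowWidth = 3
--     count = 0
--     window = deque(depths[:windowWidth])
--     lastSum = sum(window)
--     for depth in depths[windowWidth:]:
--         window.append(depth)
--         window.popleft()
--         currentSum = sum(window)
--         if currentSum > lastSum:
--             count += 1
--         lastSum = currentSum
--     return count
-- ===== SOURCE B (Python) =====
-- def part2(depths):
--     # window sums a+b+c < b+c+d iff a < d: compare elements 3 apart directly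
--     return sum(1 for a, b in zip(depths, depths[3:]) if b > a)
-- ===== Notes on version B (the rewrite author's own statement) =====
-- stated objective: simpler
-- what changed: Replaced the deque window and running sums by a one-line pairwise comparison of elements three apart (sum telescoping: a+b+c < b+c+d iff a < d), so no window or sum is maintained; one comparison instead of deque ops + a 3-element sum per step.
import Mathlib
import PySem

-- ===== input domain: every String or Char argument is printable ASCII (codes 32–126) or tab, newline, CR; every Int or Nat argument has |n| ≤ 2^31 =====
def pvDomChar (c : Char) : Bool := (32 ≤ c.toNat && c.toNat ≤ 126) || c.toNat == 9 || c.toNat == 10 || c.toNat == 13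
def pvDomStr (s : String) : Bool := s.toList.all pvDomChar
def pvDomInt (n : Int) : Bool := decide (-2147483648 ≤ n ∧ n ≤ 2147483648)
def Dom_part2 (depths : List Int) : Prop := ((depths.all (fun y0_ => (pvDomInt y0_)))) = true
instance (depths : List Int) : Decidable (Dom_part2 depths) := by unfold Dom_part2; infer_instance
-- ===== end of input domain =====

-- B replaces A's deque window and running sums by a direct comparison of elements three apart (simpler).


-- ===== PORT A =====
-- the for-loop: state = (window, lastSum, count); append+popleft, re-sum, compare
def part2Loop : List Int → List Int → Int → Int → Int
  | [], _, _, count => count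
  | d :: rest, window, lastSum, count =>
      let w := (window ++ [d]).drop 1
      let s := w.sum
      part2Loop rest w s (if s > lastSum then count + 1 else count)

def part2 (depths : List Int) : Int :=
  -- depths[:3] / depths[3:] with nonnegative bounds = take/drop
  let window := depths.take 3
  let lastSum := window.sum
  part2Loop (depths.drop 3) window lastSum 0

-- ===== PORT B =====
def part2_alt (depths : List Int) : Int :=
  Int.ofNat (((depths.zip (depths.drop 3)).countP (fun p => decide (p.1 < p.2))))

-- ===== PRECONDITION & SPEC =====
def Spec_part2 (depths : List Int) (out : Int) : Prop := out = part2_alt depths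
instance (depths : List Int) (out : Int) : Decidable (Spec_part2 depths out) := by unfold Spec_part2; infer_instance

-- ===== CLAIM (what is proved, stated in full; the proofs are below) =====
def Claim_equal_part2 : Prop := ∀ (depths : List Int), Dom_part2 depths → Spec_part2 depths (part2 depths)

-- ===== LEMMAS AND PROOFS =====

theorem part2Loop_invariant : ∀ (xs w : List Int) (c : Int), w ≠ [] →
    part2Loop xs w w.sum c
      = c + Int.ofNat (((w ++ xs).zip xs).countP (fun p => decide (p.1 < p.2))) := by
  intro xs
  induction xs with
  | nil =>
      intro w c _
      simp [part2Loop]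
  | cons d rest ih =>
      intro w c hw
      obtain ⟨w0, wr, rfl⟩ : ∃ w0 wr, w = w0 :: wr := by
        cases w with
        | nil => exact absurd rfl hw
        | cons a b => exact ⟨a, b, rfl⟩
      have hdrop : ((w0 :: wr) ++ [d]).drop 1 = wr ++ [d] := by simp
      have hne : wr ++ [d] ≠ [] := by simp
      have step : part2Loop (d :: rest) (w0 :: wr) (w0 :: wr).sum c
          = part2Loop rest (wr ++ [d]) (wr ++ [d]).sum
              (if (wr ++ [d]).sum > (w0 :: wr).sum then c + 1 else c) := by
        simp [part2Loop]
      rw [step, ih (wr ++ [d]) _ hne]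
      have hsum : ((wr ++ [d]).sum > (w0 :: wr).sum) ↔ (w0 < d) := by
        simp [List.sum_append, List.sum_cons]; omega
      have hzip : ((w0 :: wr) ++ (d :: rest)).zip (d :: rest)
          = (w0, d) :: (((wr ++ [d]) ++ rest).zip rest) := by
        simp [List.zip]
      rw [hzip]
      simp only [List.countP_cons]
      by_cases h : w0 < d
      · rw [if_pos (hsum.mpr h)]
        simp [h]; omega
      · rw [if_neg (fun hh => h (hsum.mp hh))]
        simp [h]

-- ===== VERDICT (by name: the statement is the Claim_ definition above) =====
theorem part2_spec : Claim_equal_part2 := by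
  unfold Claim_equal_part2
  intro depths _
  unfold Spec_part2 part2 part2_alt
  by_cases h : depths.drop 3 = []
  · simp [h, part2Loop]
  · have hw : depths.take 3 ≠ [] := by
      intro hnil
      have : depths = [] := by
        cases depths with
        | nil => rfl
        | cons a b => simp at hnil
      simp [this] at h
    rw [part2Loop_invariant _ _ _ hw, List.take_append_drop]
    omega
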